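-- pv_equiv track=rewrite | github.com/2016rshah/Artificial-Intelligence | AI2/computer_vision/script.py | maximums
-- ===== SOURCE A (Python) =====
-- def maximums(votes):
-- 	'''returns tuple
-- 	first value is maximum value
-- 	second value is maximum value's location'''
-- 	maxValue = 0
-- 	maxLocation = (0,0)
-- 	for i in range(0, len(votes)):
-- 		for j in range(0, len(votes[i])):
-- 			if(votes[i][j] > maxValue):
-- 				maxValue = votes[i][j]
-- 				maxLocation = (i,j)
-- 	return (maxValue, maxLocation)
-- ===== SOURCE B (Python) =====
-- def maximums(votes):
--     '''returns tuple
--     first value is maximum value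
--     second value is maximum value's location'''
--     best = max((x for row in votes for x in row), default=0)
--     for i, row in enumerate(votes):
--         if best > 0 and best in row:
--             return (best, (i, row.index(best)))
--     return (0, (0, 0))
-- ===== Notes on version B (the rewrite author's own statement) =====
-- stated objective: alternative
-- what changed: Replaces A's single nested accumulator loop by a two-phase algorithm: first compute the global maximum value of the flattened grid with one max() call, then locate its first row-major occurrence by membership test and row.index, returning (0,(0,0)) when the maximum is not positive.
import Mathlib
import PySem

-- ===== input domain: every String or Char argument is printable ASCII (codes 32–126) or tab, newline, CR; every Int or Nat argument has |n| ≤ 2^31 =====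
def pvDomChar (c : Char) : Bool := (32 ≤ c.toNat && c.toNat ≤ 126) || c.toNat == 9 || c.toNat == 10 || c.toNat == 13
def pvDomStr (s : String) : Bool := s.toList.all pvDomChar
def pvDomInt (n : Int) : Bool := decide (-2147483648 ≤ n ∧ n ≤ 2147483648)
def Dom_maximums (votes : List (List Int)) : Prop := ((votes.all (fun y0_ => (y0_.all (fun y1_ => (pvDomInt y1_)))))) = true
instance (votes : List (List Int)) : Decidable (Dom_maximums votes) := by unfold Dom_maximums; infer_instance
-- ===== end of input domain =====

-- B replaces A's single nested accumulator loop by a two-phase algorithm: first the global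
-- maximum of the flattened grid via one max() call, then a search for its first row-major
-- occurrence; same cost, alternative structure.

-- ===== PORT A =====
-- literal transliteration of A's nested index loops (votes[i][j] via pyGetD; indices always in range)
def maximums (votes : List (List Int)) : Int × (Int × Int) :=
  (PySem.List.pyRange 0 (PySem.List.len votes) 1).foldl
    (fun s i =>
      let row := PySem.List.pyGetD votes i []
      (PySem.List.pyRange 0 (PySem.List.len row) 1).foldl
        (fun s j =>
          if PySem.List.pyGetD row j 0 > s.1 then (PySem.List.pyGetD row j 0, (i, j)) else s)
        s)
    (0, (0, 0))

-- ===== PORT B =====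
-- the location loop: first row containing `best` (guarded by best > 0), column via row.index
-- (row.index cannot raise here: the membership guard ensures index? is some, so getD 0 is exact)
def locateBest (best : Int) : List (Int × List Int) → Int × (Int × Int)
  | [] => (0, (0, 0))
  | (i, row) :: rest =>
      if best > 0 ∧ best ∈ row then (best, (i, ((PySem.List.index? row best).getD 0 : Nat)))
      else locateBest best rest

-- best = max(flattened grid, default=0), then the first-occurrence search
def maximums_alt (votes : List (List Int)) : Int × (Int × Int) :=
  let flat := votes.flatMap (fun row => row)
  let best := match PySem.List.max? flat (fun x => x) with
    | some m => m
    | none => 0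
  locateBest best (PySem.List.enumerate votes 0)

-- ===== PRECONDITION & SPEC =====
def Spec_maximums (votes : List (List Int)) (out : Int × (Int × Int)) : Prop := out = maximums_alt votes
instance (votes : List (List Int)) (out : Int × (Int × Int)) : Decidable (Spec_maximums votes out) := by unfold Spec_maximums; infer_instance

-- ===== CLAIM (what is proved, stated in full; the proofs are below) =====
def Claim_equal_maximums : Prop := ∀ (votes : List (List Int)), Dom_maximums votes → Spec_maximums votes (maximums votes)

-- ===== LEMMAS AND PROOFS =====

-- row-major candidate list (value, (row, column)) and the accumulating step of A's loop
def rowC (i : Int) (row : List Int) : List (Int × (Int × Int)) :=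
  (PySem.List.enumerate row 0).map (fun q => (q.2, (i, q.1)))

def cands (votes : List (List Int)) : List (Int × (Int × Int)) :=
  (PySem.List.enumerate votes 0).flatMap (fun p => rowC p.1 p.2)

def stepA (s c : Int × (Int × Int)) : Int × (Int × Int) := if c.1 > s.1 then c else s

lemma foldl_flatMap_eq {α β γ : Type} (g : β → List γ) (f : α → γ → α) :
    ∀ (L : List β) (a : α), (L.flatMap g).foldl f a = L.foldl (fun a b => (g b).foldl f a) a := by
  intro L
  induction L with
  | nil => intro a; rfl
  | cons b L ih => intro a; simp [List.flatMap_cons, List.foldl_append, ih]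

-- A's nested index loops = one fold of stepA over the candidate list
lemma maximums_eq_fold (votes : List (List Int)) :
    maximums votes = (cands votes).foldl stepA (0, (0, 0)) := by
  unfold maximums cands rowC stepA
  rw [foldl_flatMap_eq]
  simp only [fun xs => PySem.List.enumerate_eq_map_pyRange xs ([] : List Int),
    fun xs => PySem.List.enumerate_eq_map_pyRange xs (0 : Int), List.foldl_map]

-- the fold's value is the running max of the candidate values over the initial value
lemma fold_fst (C : List (Int × (Int × Int))) : ∀ (s : Int × (Int × Int)),
    (C.foldl stepA s).1 = (C.map Prod.fst).foldl max s.1 := by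
  induction C with
  | nil => intro s; rfl
  | cons c C ih =>
    intro s
    simp only [List.foldl_cons, List.map_cons, stepA]
    by_cases h : c.1 > s.1
    · rw [if_pos h, ih]; congr 1; omega
    · rw [if_neg h, ih]; congr 1; omega

lemma le_foldl_max' (l : List Int) : ∀ (a : Int), a ≤ l.foldl max a := by
  induction l with
  | nil => intro a; simp
  | cons x l ih => intro a; simpa using le_trans (le_max_left a x) (ih (max a x))

lemma mem_le_foldl_max (l : List Int) : ∀ (a x : Int), x ∈ l → x ≤ l.foldl max a := by
  induction l with
  | nil => intro a x hx; simp at hx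
  | cons y l ih =>
    intro a x hx
    simp only [List.foldl_cons]
    rcases List.mem_cons.mp hx with h | h
    · subst h; exact le_trans (le_max_right a x) (le_foldl_max' l (max a x))
    · exact ih (max a y) x h

-- if the fold's value did not improve, the state is unchanged
lemma fold_stable (C : List (Int × (Int × Int))) : ∀ (s : Int × (Int × Int)),
    (C.foldl stepA s).1 ≤ s.1 → C.foldl stepA s = s := by
  induction C with
  | nil => intro s _; rfl
  | cons c C ih =>
    intro s h
    simp only [List.foldl_cons, stepA] at h ⊢
    by_cases hc : c.1 > s.1
    · exfalso
      rw [if_pos hc, fold_fst] at h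
      have := le_foldl_max' (C.map Prod.fst) c.1
      omega
    · rw [if_neg hc] at h ⊢
      exact ih s h

-- if the max M of the values beats the initial value, the fold lands on the FIRST candidate of value M
lemma fold_char (C : List (Int × (Int × Int))) (M : Int) : ∀ (v0 : Int) (loc0 : Int × Int),
    M = (C.map Prod.fst).foldl max v0 → M > v0 →
    ∃ loc, C.find? (fun c => c.1 == M) = some (M, loc)
      ∧ C.foldl stepA (v0, loc0) = (M, loc) := by
  induction C with
  | nil => intro v0 loc0 hMdef h; simp at hMdef; omega
  | cons c C ih =>
    intro v0 loc0 hMdef h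
    simp only [List.map_cons, List.foldl_cons] at hMdef
    simp only [List.foldl_cons]
    by_cases hc : c.1 > v0
    · have hmx : max v0 c.1 = c.1 := by omega
      rw [hmx] at hMdef
      have hge : c.1 ≤ M := hMdef ▸ le_foldl_max' (C.map Prod.fst) c.1
      by_cases hMx : M = c.1
      · refine ⟨c.2, ?_, ?_⟩
        · rw [List.find?_cons_of_pos (by simp [hMx])]
          simp [hMx]
        · simp only [stepA, if_pos hc]
          have hstv : (C.foldl stepA c).1 ≤ c.1 := by
            rw [fold_fst]; omega
          rw [fold_stable C c hstv, hMx]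
      · have hMgt : M > c.1 := by omega
        obtain ⟨loc, hfind, hfold⟩ := ih c.1 c.2 hMdef hMgt
        refine ⟨loc, ?_, ?_⟩
        · rw [List.find?_cons_of_neg (by simp; omega), hfind]
        · simp only [stepA, if_pos hc]
          exact hfold
    · have hmx : max v0 c.1 = v0 := by omega
      rw [hmx] at hMdef
      obtain ⟨loc, hfind, hfold⟩ := ih v0 loc0 hMdef h
      refine ⟨loc, ?_, ?_⟩
      · rw [List.find?_cons_of_neg (by simp; omega), hfind]
      · simp only [stepA, if_neg hc]
        exact hfold

-- the candidate values ARE the flattened grid (for any start index of the outer enumeration)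
lemma map_fst_cands_aux (votes : List (List Int)) : ∀ (s : Int),
    ((PySem.List.enumerate votes s).flatMap (fun p => rowC p.1 p.2)).map Prod.fst
      = votes.flatMap (fun row => row) := by
  induction votes with
  | nil => intro s; rfl
  | cons r t ih =>
    intro s
    rw [PySem.List.enumerate_cons, List.flatMap_cons, List.map_append, ih (s + 1),
      List.flatMap_cons]
    congr 1
    unfold rowC
    simp [List.map_map, Function.comp_def, PySem.List.map_snd_enumerate]

lemma map_fst_cands (votes : List (List Int)) :
    (cands votes).map Prod.fst = votes.flatMap (fun row => row) := map_fst_cands_aux votes 0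

lemma foldl_max_le (l : List Int) : ∀ (a b : Int), a ≤ b → (∀ x ∈ l, x ≤ b) → l.foldl max a ≤ b := by
  induction l with
  | nil => intro a b hab _; simpa
  | cons x l ih =>
    intro a b hab hall
    simp only [List.foldl_cons]
    exact ih (max a x) b (by have := hall x (by simp); omega) (fun y hy => hall y (by simp [hy]))

-- find? on one row's candidates: the first occurrence of best, at column index? row best
lemma find_rowC (best : Int) (row : List Int) (hm : best ∈ row) (i : Int) : ∀ (s : Int),
    ((PySem.List.enumerate row s).map (fun q => (q.2, (i, q.1)))).find? (fun c => c.1 == best)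
      = some (best, (i, s + (((PySem.List.index? row best).getD 0 : Nat) : Int))) := by
  induction row with
  | nil => exact absurd hm (by simp)
  | cons x t ih =>
    intro s
    simp only [PySem.List.enumerate_cons, List.map_cons]
    by_cases hx : x = best
    · subst hx
      rw [List.find?_cons_of_pos (by simp), PySem.List.index?_cons_self]
      simp
    · rw [List.find?_cons_of_neg (by simp [hx])]
      have hmt : best ∈ t := by
        rcases List.mem_cons.mp hm with h | h
        · exact absurd h.symm hx
        · exact h
      rw [ih hmt (s + 1), PySem.List.index?_cons_of_ne t hx]
      rcases h2 : PySem.List.index? t best with _ | k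
      · exact absurd ((PySem.List.index?_eq_none_iff t best).mp h2) (by simpa using hmt)
      · simp
        omega

lemma find_rowC_none (best : Int) (row : List Int) (hm : best ∉ row) (i : Int) :
    (rowC i row).find? (fun c => c.1 == best) = none := by
  rw [List.find?_eq_none]
  intro c hc
  unfold rowC at hc
  simp only [List.mem_map] at hc
  obtain ⟨q, hq, rfl⟩ := hc
  have : q.2 ∈ row := by
    have := PySem.List.map_snd_enumerate row (0 : Int)
    exact this ▸ List.mem_map_of_mem hq
  simp only [beq_iff_eq]
  intro h; exact hm (h ▸ this)

-- locateBest over the enumeration = the find? of the first candidate of value best, when best > 0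
lemma locate_eq_find (best : Int) (hb : best > 0) :
    ∀ (E : List (Int × List Int)),
      locateBest best E =
        match (E.flatMap (fun p => rowC p.1 p.2)).find? (fun c => c.1 == best) with
        | some c => (best, c.2)
        | none => (0, (0, 0)) := by
  intro E
  induction E with
  | nil => rfl
  | cons p E ih =>
    obtain ⟨i, row⟩ := p
    simp only [locateBest, List.flatMap_cons, List.find?_append]
    by_cases hm : best ∈ row
    · rw [if_pos ⟨hb, hm⟩]
      have hfind : (rowC i row).find? (fun c => c.1 == best)
          = some (best, (i, (((PySem.List.index? row best).getD 0 : Nat) : Int))) := by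
        unfold rowC
        rw [find_rowC best row hm i 0]
        norm_num
      rw [hfind, Option.some_or]
    · rw [if_neg (by rintro ⟨_, h⟩; exact hm h), find_rowC_none best row hm i, Option.none_or, ih]

-- when best is not positive the location loop never fires
lemma locate_nonpos (best : Int) (hb : ¬ best > 0) :
    ∀ (E : List (Int × List Int)), locateBest best E = (0, (0, 0)) := by
  intro E
  induction E with
  | nil => rfl
  | cons p E ih =>
    obtain ⟨i, row⟩ := p
    simp only [locateBest]
    rw [if_neg (by rintro ⟨h, _⟩; exact hb h), ih]

-- ===== VERDICT (by name: the statement is the Claim_ definition above) =====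
theorem maximums_spec : Claim_equal_maximums := by
  intro votes _
  unfold Spec_maximums maximums_alt
  rw [maximums_eq_fold]
  set flat := votes.flatMap (fun row => row) with hflat
  have hvals : (cands votes).map Prod.fst = flat := map_fst_cands votes
  cases hmax : PySem.List.max? flat (fun x => x) with
  | none =>
    have hnil : flat = [] := (PySem.List.max?_eq_none_iff _ _).mp hmax
    have hc : cands votes = [] := by
      have h := hvals
      rw [hnil] at h
      exact List.map_eq_nil_iff.mp h
    rw [hc]
    simp only [hmax]
    rw [locate_nonpos 0 (by omega)]
    rfl
  | some best =>
    simp only [hmax]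
    have hmem : best ∈ flat := PySem.List.max?_mem hmax
    have hub : ∀ y ∈ flat, y ≤ best := fun y hy => PySem.List.max?_isMax hmax y hy
    by_cases hb : best > 0
    · have hM : flat.foldl max 0 = best := by
        have h1 : flat.foldl max 0 ≤ best := foldl_max_le flat 0 best (by omega) hub
        have h2 : best ≤ flat.foldl max 0 := mem_le_foldl_max flat 0 best hmem
        omega
      have hMdef : best = ((cands votes).map Prod.fst).foldl max 0 := by rw [hvals, hM]
      obtain ⟨loc, hfind, hfold⟩ := fold_char (cands votes) best 0 (0, 0) hMdef (by omega)
      rw [hfold, locate_eq_find best hb]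
      unfold cands at hfind
      rw [hfind]
    · have hle : ((cands votes).foldl stepA (0, (0, 0))).1 ≤ 0 := by
        rw [fold_fst, hvals]
        exact foldl_max_le flat 0 0 le_rfl (fun x hx => le_trans (hub x hx) (by omega))
      rw [fold_stable _ _ hle, locate_nonpos best hb]
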